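-- pv_equiv track=rewrite | github.com/Infant83/Federlicht | src/federlicht/tools.py | _classify_evidence_strength
-- ===== SOURCE A (Python) =====
-- def _classify_evidence_strength(refs: list[str]) -> str:
--     if not refs:
--         return "none"
--     strong = any(
--         ref.endswith(".pdf")
--         or "/text/" in ref
--         or "doi.org" in ref
--         or "arxiv.org" in ref
--         for ref in refs
--     )
--     if strong:
--         return "high"
--     medium = any(
--         "tavily_extract" in ref
--         or "youtube/transcripts" in ref
--         or "/local/text" in ref
--         or "/web_text" in ref
--         for ref in refs
--     )
--     return "medium" if medium else "low"
-- ===== SOURCE B (Python) =====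
-- def _classify_evidence_strength(refs: list[str]) -> str:
--     if not refs:
--         return "none"
--     medium = False
--     for ref in refs:
--         if (ref.endswith(".pdf") or "/text/" in ref
--                 or "doi.org" in ref or "arxiv.org" in ref):
--             return "high"
--         if (not medium
--                 and ("tavily_extract" in ref or "youtube/transcripts" in ref
--                      or "/local/text" in ref or "/web_text" in ref)):
--             medium = True
--     return "medium" if medium else "low"
-- ===== Notes on version B (the rewrite author's own statement) =====
-- stated objective: alternative
-- what changed: Fuses A's two independent any() scans into a single pass over refs with an early 'high' return and a boolean medium flag.
import Mathlib
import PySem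

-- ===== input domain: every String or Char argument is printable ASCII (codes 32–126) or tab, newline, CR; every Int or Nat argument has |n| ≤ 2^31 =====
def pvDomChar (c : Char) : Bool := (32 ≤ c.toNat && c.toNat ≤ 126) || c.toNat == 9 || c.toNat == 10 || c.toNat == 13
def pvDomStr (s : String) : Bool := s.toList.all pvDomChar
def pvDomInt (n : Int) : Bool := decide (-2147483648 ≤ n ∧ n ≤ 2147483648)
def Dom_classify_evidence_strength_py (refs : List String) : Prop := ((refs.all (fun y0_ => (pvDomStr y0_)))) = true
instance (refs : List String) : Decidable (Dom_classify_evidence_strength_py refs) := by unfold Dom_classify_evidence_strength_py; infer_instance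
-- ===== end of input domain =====

-- B fuses A's two independent any() scans into a single pass with an early 'high' return and a medium flag (alternative decomposition, same result).

-- ===== PORT A =====
def pvStrongA (ref : String) : Bool :=
  PySem.Str.endswith ref ".pdf" || PySem.Str.isIn "/text/" ref ||
  PySem.Str.isIn "doi.org" ref || PySem.Str.isIn "arxiv.org" ref

def pvMediumA (ref : String) : Bool :=
  PySem.Str.isIn "tavily_extract" ref || PySem.Str.isIn "youtube/transcripts" ref ||
  PySem.Str.isIn "/local/text" ref || PySem.Str.isIn "/web_text" ref

def classify_evidence_strength_py (refs : List String) : String :=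
  match refs with
  | [] => "none"
  | _ =>
    let strong := refs.any pvStrongA
    if strong then "high"
    else
      let medium := refs.any pvMediumA
      if medium then "medium" else "low"

-- ===== PORT B =====
def pvLoop (refs : List String) (medium : Bool) : String :=
  match refs with
  | [] => if medium then "medium" else "low"
  | r :: rest =>
    if PySem.Str.endswith r ".pdf" || PySem.Str.isIn "/text/" r ||
       PySem.Str.isIn "doi.org" r || PySem.Str.isIn "arxiv.org" r then "high"
    else pvLoop rest
      (if !medium && (PySem.Str.isIn "tavily_extract" r || PySem.Str.isIn "youtube/transcripts" r ||
          PySem.Str.isIn "/local/text" r || PySem.Str.isIn "/web_text" r) then true else medium)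

def classify_evidence_strength_py_alt (refs : List String) : String :=
  if refs.isEmpty then "none" else pvLoop refs false

-- ===== PRECONDITION & SPEC =====
def Spec_classify_evidence_strength_py (refs : List String) (out : String) : Prop := out = classify_evidence_strength_py_alt refs
instance (refs : List String) (out : String) : Decidable (Spec_classify_evidence_strength_py refs out) := by unfold Spec_classify_evidence_strength_py; infer_instance

-- ===== CLAIM (what is proved, stated in full; the proofs are below) =====
def Claim_equal_classify_evidence_strength_py : Prop := ∀ (refs : List String), Dom_classify_evidence_strength_py refs → Spec_classify_evidence_strength_py refs (classify_evidence_strength_py refs)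

-- ===== LEMMAS AND PROOFS =====
theorem pvLoop_eq (refs : List String) (m : Bool) :
    pvLoop refs m =
      if refs.any pvStrongA then "high"
      else if m || refs.any pvMediumA then "medium" else "low" := by
  induction refs generalizing m with
  | nil => cases m <;> simp [pvLoop]
  | cons r rest ih =>
    have hstep : pvLoop (r :: rest) m =
        (if pvStrongA r then "high"
         else pvLoop rest (if !m && pvMediumA r then true else m)) := rfl
    rw [hstep]
    simp only [List.any_cons]
    by_cases hs : pvStrongA r
    · simp [hs]
    · rw [ih]
      cases m <;> by_cases hm : pvMediumA r <;> simp [hs, hm]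

-- ===== VERDICT (by name: the statement is the Claim_ definition above) =====
theorem classify_evidence_strength_py_spec : Claim_equal_classify_evidence_strength_py := by
  intro refs _
  unfold Spec_classify_evidence_strength_py classify_evidence_strength_py classify_evidence_strength_py_alt
  cases refs with
  | nil => rfl
  | cons r rest => rw [pvLoop_eq]; simp
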